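-- pv_equiv track=rewrite | github.com/solitaryzero/NIL_EL | src/genre/utils.py | nil_accuracy
-- ===== SOURCE A (Python) =====
-- def nil_accuracy(out, labels):
--     count = 0
--     nil_count = 0
--     nil_num = 0
--     normal_count = 0
--     normal_num = 0
--
--     for dec, ref in zip(out, labels):
--         if (dec == ref):
--             count += 1
--             if (ref == 'NIL'):
--                 nil_count += 1
--             else:
--                 normal_count += 1
--
--         if (ref == 'NIL'):
--             nil_num += 1
--         else:
--             normal_num += 1
--
--     return count, nil_count, nil_num, normal_count, normal_num
-- ===== SOURCE B (Python) =====
-- def nil_accuracy(out, labels):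
--     pairs = list(zip(out, labels))
--     count = sum(1 for d, r in pairs if d == r)
--     nil_count = sum(1 for d, r in pairs if d == r and r == 'NIL')
--     nil_num = sum(1 for _, r in pairs if r == 'NIL')
--     normal_count = count - nil_count
--     normal_num = len(pairs) - nil_num
--     return count, nil_count, nil_num, normal_count, normal_num
-- ===== Notes on version B (the rewrite author's own statement) =====
-- stated objective: simpler
-- what changed: Replaces the single fused loop with five accumulators by building the zipped pair list once and computing each returned count with its own independent comprehension (normal_count and normal_num derived by subtraction).
import Mathlib
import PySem

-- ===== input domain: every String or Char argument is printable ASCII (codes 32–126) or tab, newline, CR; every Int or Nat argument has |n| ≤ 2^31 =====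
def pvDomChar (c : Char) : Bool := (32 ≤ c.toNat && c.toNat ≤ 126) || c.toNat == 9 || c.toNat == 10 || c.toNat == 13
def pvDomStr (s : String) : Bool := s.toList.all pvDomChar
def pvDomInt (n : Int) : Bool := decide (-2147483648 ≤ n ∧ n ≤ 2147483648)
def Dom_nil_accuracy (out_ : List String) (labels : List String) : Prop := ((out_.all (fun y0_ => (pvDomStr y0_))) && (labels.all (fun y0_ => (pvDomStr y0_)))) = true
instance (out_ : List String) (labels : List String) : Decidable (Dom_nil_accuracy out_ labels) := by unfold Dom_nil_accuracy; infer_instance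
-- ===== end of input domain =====

-- B replaces A's single fused loop (five running accumulators) with one zipped pair
-- list scanned by an independent comprehension per returned count; objective: simpler.

-- ===== PORT A =====
-- A's loop body: update the five accumulators (count, nil_count, nil_num, normal_count, normal_num)
def nilAccStep (st : Int × Int × Int × Int × Int) (p : String × String) :
    Int × Int × Int × Int × Int :=
  let (count, nil_count, nil_num, normal_count, normal_num) := st
  let (count, nil_count, normal_count) :=
    if p.1 == p.2 then
      if p.2 == "NIL" then (count + 1, nil_count + 1, normal_count)
      else (count + 1, nil_count, normal_count + 1)
    else (count, nil_count, normal_count)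
  if p.2 == "NIL" then (count, nil_count, nil_num + 1, normal_count, normal_num)
  else (count, nil_count, nil_num, normal_count, normal_num + 1)

def nil_accuracy (out_ : List String) (labels : List String) : Int × Int × Int × Int × Int :=
  (out_.zip labels).foldl nilAccStep (0, 0, 0, 0, 0)

-- ===== PORT B =====
def nil_accuracy_alt (out_ : List String) (labels : List String) : Int × Int × Int × Int × Int :=
  let pairs := out_.zip labels
  let count : Int := ((pairs.filter (fun p => p.1 == p.2)).length : Int)
  let nil_count : Int := ((pairs.filter (fun p => p.1 == p.2 && p.2 == "NIL")).length : Int)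
  let nil_num : Int := ((pairs.filter (fun p => p.2 == "NIL")).length : Int)
  let normal_count : Int := count - nil_count
  let normal_num : Int := (pairs.length : Int) - nil_num
  (count, nil_count, nil_num, normal_count, normal_num)

-- ===== PRECONDITION & SPEC =====
def Spec_nil_accuracy (out_ : List String) (labels : List String) (out : Int × Int × Int × Int × Int) : Prop := out = nil_accuracy_alt out_ labels
instance (out_ : List String) (labels : List String) (out : Int × Int × Int × Int × Int) : Decidable (Spec_nil_accuracy out_ labels out) := by unfold Spec_nil_accuracy; infer_instance

-- ===== CLAIM (what is proved, stated in full; the proofs are below) =====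
def Claim_equal_nil_accuracy : Prop := ∀ (out_ : List String) (labels : List String), Dom_nil_accuracy out_ labels → Spec_nil_accuracy out_ labels (nil_accuracy out_ labels)

-- ===== LEMMAS AND PROOFS =====

-- invariant of A's loop over an arbitrary pair list, with general accumulators
theorem nilAccStep_foldl (l : List (String × String))
    (c nc nn mc mn : Int) :
    l.foldl nilAccStep (c, nc, nn, mc, mn) =
      (c + ((l.filter (fun p => p.1 == p.2)).length : Int),
       nc + ((l.filter (fun p => p.1 == p.2 && p.2 == "NIL")).length : Int),
       nn + ((l.filter (fun p => p.2 == "NIL")).length : Int),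
       mc + (((l.filter (fun p => p.1 == p.2)).length : Int)
             - ((l.filter (fun p => p.1 == p.2 && p.2 == "NIL")).length : Int)),
       mn + ((l.length : Int) - ((l.filter (fun p => p.2 == "NIL")).length : Int))) := by
  induction l generalizing c nc nn mc mn with
  | nil => simp
  | cons h t ih =>
    simp only [List.foldl_cons, nilAccStep, List.filter_cons, List.length_cons]
    by_cases h1 : (h.1 == h.2) = true <;> by_cases h2 : (h.2 == "NIL") = true <;>
      simp [h1, h2, ih] <;> and_intros <;> ring

-- ===== VERDICT (by name: the statement is the Claim_ definition above) =====
theorem nil_accuracy_spec : Claim_equal_nil_accuracy := by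
  intro out_ labels _
  show _ = _
  simp [nil_accuracy, nil_accuracy_alt, nilAccStep_foldl]
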